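-- pv_equiv track=rewrite | github.com/BeepingBusyBeaver/scan2sim | scripts/infer/infer_feature_classifier.py | _infer_frame_offset
-- ===== SOURCE A (Python) =====
-- from typing import Any, Dict, List, Sequence, Tuple
--
-- def _infer_frame_offset(pred_numeric_keys: Sequence[int], gt_frames: Sequence[int]) -> int:
--     pred_set = set(pred_numeric_keys)
--     gt_set = set(gt_frames)
--     best_offset = 0
--     best_overlap = -1
--     for offset in (0, 1):
--         overlap = sum(1 for frame in gt_set if (frame + offset) in pred_set)
--         if overlap > best_overlap:
--             best_overlap = overlap
--             best_offset = offset
--     return best_offset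
-- ===== SOURCE B (Python) =====
-- def _infer_frame_offset(pred_numeric_keys, gt_frames):
--     # Sort-then-merge: overlap at offset o is the size of the intersection of
--     # the (shifted) deduplicated gt frames with the deduplicated pred keys,
--     # counted by a two-pointer merge over the two sorted lists.
--     pred = sorted(set(pred_numeric_keys))
--     gt = sorted(set(gt_frames))
--
--     def inter_size(xs, ys):
--         i = j = n = 0
--         while i < len(xs) and j < len(ys):
--             if xs[i] < ys[j]:
--                 i += 1
--             elif ys[j] < xs[i]:
--                 j += 1
--             else:
--                 n += 1
--                 i += 1
--                 j += 1
--         return n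
--
--     return 1 if inter_size([f + 1 for f in gt], pred) > inter_size(gt, pred) else 0
-- ===== Notes on version B (the rewrite author's own statement) =====
-- stated objective: alternative
-- what changed: Replaces hash-set membership tests inside a best-offset search loop by a sort-then-merge algorithm: both inputs are deduplicated and sorted, each overlap is the size of a sorted-list intersection computed by a two-pointer merge, and the two sizes are compared directly (strict >, so ties give offset 0).
import Mathlib
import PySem

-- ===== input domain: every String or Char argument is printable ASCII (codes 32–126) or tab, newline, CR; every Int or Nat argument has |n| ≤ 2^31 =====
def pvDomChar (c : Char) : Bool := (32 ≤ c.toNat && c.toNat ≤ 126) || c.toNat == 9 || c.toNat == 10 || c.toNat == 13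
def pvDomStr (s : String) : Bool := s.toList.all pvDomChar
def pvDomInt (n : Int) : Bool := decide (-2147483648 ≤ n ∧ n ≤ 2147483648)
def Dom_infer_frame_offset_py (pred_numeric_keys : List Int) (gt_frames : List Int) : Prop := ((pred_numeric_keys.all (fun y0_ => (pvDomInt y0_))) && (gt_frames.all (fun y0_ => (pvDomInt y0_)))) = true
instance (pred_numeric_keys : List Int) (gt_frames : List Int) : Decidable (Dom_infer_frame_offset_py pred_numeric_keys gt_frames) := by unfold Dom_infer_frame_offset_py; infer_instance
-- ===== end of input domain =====

-- B replaces A's hash-set membership search over offsets by a sort-then-merge algorithm: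
-- each overlap is a sorted-list intersection size computed by a two-pointer merge
-- (objective: alternative; same behaviour, tie → 0).

-- ===== PORT A =====
-- loop over offsets (0, 1) keeping (best_offset, best_overlap); the inner sum iterates gt_set
-- (order-independent, so Set iteration is exact here)
def infer_frame_offset_py (pred_numeric_keys : List Int) (gt_frames : List Int) : Int :=
  let pred_set : PySem.Set Int := PySem.Set.ofList pred_numeric_keys
  let gt_set : PySem.Set Int := PySem.Set.ofList gt_frames
  let st := [(0 : Int), 1].foldl (fun (st : Int × Int) offset =>
    let overlap := gt_set.foldl
      (fun acc frame => if pred_set.contains (frame + offset) then acc + 1 else acc) (0 : Int)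
    if overlap > st.2 then (offset, overlap) else st) ((0 : Int), (-1 : Int))
  st.1

-- ===== PORT B =====
-- two-pointer merge over two sorted lists, counting common elements (Source B's while loop
-- as the structural recursion on the two pointers' suffixes)
def pvInterSize : List Int → List Int → Int
  | [], _ => 0
  | _ :: _, [] => 0
  | x :: xs, y :: ys =>
    if x < y then pvInterSize xs (y :: ys)
    else if y < x then pvInterSize (x :: xs) ys
    else 1 + pvInterSize xs ys

-- sorted(set(...)) twice, then compare the two merge-intersection sizes
def infer_frame_offset_py_alt (pred_numeric_keys : List Int) (gt_frames : List Int) : Int :=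
  let pred := PySem.List.sorted (PySem.Set.ofList pred_numeric_keys) (fun x => x) false
  let gt := PySem.List.sorted (PySem.Set.ofList gt_frames) (fun x => x) false
  if pvInterSize (gt.map (fun f => f + 1)) pred > pvInterSize gt pred then 1 else 0

-- ===== PRECONDITION & SPEC =====
def Spec_infer_frame_offset_py (pred_numeric_keys : List Int) (gt_frames : List Int) (out : Int) : Prop := out = infer_frame_offset_py_alt pred_numeric_keys gt_frames
instance (pred_numeric_keys : List Int) (gt_frames : List Int) (out : Int) : Decidable (Spec_infer_frame_offset_py pred_numeric_keys gt_frames out) := by unfold Spec_infer_frame_offset_py; infer_instance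

-- ===== CLAIM (what is proved, stated in full; the proofs are below) =====
def Claim_equal_infer_frame_offset_py : Prop := ∀ (pred_numeric_keys : List Int) (gt_frames : List Int), Dom_infer_frame_offset_py pred_numeric_keys gt_frames → Spec_infer_frame_offset_py pred_numeric_keys gt_frames (infer_frame_offset_py pred_numeric_keys gt_frames)

-- ===== LEMMAS AND PROOFS =====

-- A's counting fold is init + (number of elements satisfying p)
theorem pvFoldCount (p : Int → Bool) : ∀ (L : List Int) (a : Int),
    L.foldl (fun acc f => if p f then acc + 1 else acc) a = a + ((L.filter p).length : Int) := by
  intro L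
  induction L with
  | nil => intro a; simp
  | cons x xs ih =>
      intro a
      simp only [List.foldl_cons, List.filter_cons]
      by_cases h : p x
      · simp only [h, if_pos, ih]; simp; omega
      · simp only [h]; simp only [Bool.false_eq_true, if_false, ih]

-- the merge intersection of two strictly increasing lists counts the members of xs lying in ys
theorem pvInterSize_eq_filter : ∀ (xs ys : List Int),
    xs.Pairwise (· < ·) → ys.Pairwise (· < ·) →
    pvInterSize xs ys = ((xs.filter (fun x => ys.contains x)).length : Int) := by
  intro xs
  induction xs with
  | nil => intro ys _ _; simp [pvInterSize]
  | cons x xs ih =>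
      intro ys hxs hys
      induction ys with
      | nil => simp [pvInterSize]
      | cons y ys ihy =>
          have hx' := (List.pairwise_cons.mp hxs).2
          have hxall := (List.pairwise_cons.mp hxs).1
          have hy' := (List.pairwise_cons.mp hys).2
          have hyall := (List.pairwise_cons.mp hys).1
          by_cases h1 : x < y
          · -- x not in y::ys
            have hnot : ((y :: ys).contains x) = false := by
              simp only [List.contains_eq_mem, List.mem_cons, decide_eq_false_iff_not]
              push Not
              refine ⟨by omega, fun hm => ?_⟩
              have := hyall x hm; omega
            simp only [pvInterSize, if_pos h1, List.filter_cons, hnot, Bool.false_eq_true,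
              if_false]
            exact ih (y :: ys) hx' hys
          · by_cases h2 : y < x
            · -- y is smaller than every element of x::xs: drop y
              have hcongr : (x :: xs).filter (fun z => (y :: ys).contains z)
                  = (x :: xs).filter (fun z => ys.contains z) := by
                apply List.filter_congr
                intro z hz
                have hzgt : y < z := by
                  rcases List.mem_cons.mp hz with rfl | hz'
                  · exact h2
                  · have := hxall z hz'; omega
                simp only [List.contains_eq_mem, List.mem_cons, decide_eq_decide]
                constructor
                · rintro (rfl | h) <;> [omega; exact h]
                · exact Or.inr
              simp only [pvInterSize, if_neg h1, if_pos h2, hcongr]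
              exact ihy hy'
            · -- x = y
              have hxy : x = y := by omega
              subst hxy
              have hmem : ((x :: ys).contains x) = true := by
                simp [List.contains_eq_mem]
              have hcongr : xs.filter (fun z => (x :: ys).contains z)
                  = xs.filter (fun z => ys.contains z) := by
                apply List.filter_congr
                intro z hz
                have hzgt : x < z := hxall z hz
                simp only [List.contains_eq_mem, List.mem_cons, decide_eq_decide]
                constructor
                · rintro (rfl | h) <;> [omega; exact h]
                · exact Or.inr
              simp only [pvInterSize, lt_irrefl, if_false, List.filter_cons, hmem, if_pos,
                hcongr, List.length_cons]
              rw [ih ys hx' hy']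
              push_cast
              ring

-- membership in a permutation: equal contains
theorem pvContains_perm {xs ys : List Int} (h : xs.Perm ys) (z : Int) :
    xs.contains z = ys.contains z := by
  simp only [List.contains_eq_mem, decide_eq_decide]
  exact ⟨fun m => h.mem_iff.mp m, fun m => h.mem_iff.mpr m⟩

-- the overlap at offset o on any permutation of gt_set, via any list with the same members as pred_set
theorem pvFilter_len_perm (p : Int → Bool) {xs ys : List Int} (h : xs.Perm ys) :
    (xs.filter p).length = (ys.filter p).length := (h.filter p).length_eq

-- ===== VERDICT (by name: the statement is the Claim_ definition above) =====
theorem infer_frame_offset_py_spec : Claim_equal_infer_frame_offset_py := by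
  intro pred gt _
  show infer_frame_offset_py pred gt = infer_frame_offset_py_alt pred gt
  unfold infer_frame_offset_py infer_frame_offset_py_alt
  set P : List Int := PySem.Set.ofList pred with hP
  set G : List Int := PySem.Set.ofList gt with hG
  set SP : List Int := PySem.List.sorted P (fun x => x) false with hSP
  set SG : List Int := PySem.List.sorted G (fun x => x) false with hSG
  have hPperm : SP.Perm P := PySem.List.sorted_perm ..
  have hGperm : SG.Perm G := PySem.List.sorted_perm ..
  have hPsort : SP.Pairwise (· < ·) := PySem.List.sorted_ofList_pairwise_lt ..
  have hGsort : SG.Pairwise (· < ·) := PySem.List.sorted_ofList_pairwise_lt ..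
  -- B side: the two merge sizes are filter counts over G
  have hB0 : pvInterSize SG SP = ((G.filter (fun f => P.contains f)).length : Int) := by
    rw [pvInterSize_eq_filter SG SP hGsort hPsort]
    have : SG.filter (fun x => SP.contains x) = SG.filter (fun f => P.contains f) := by
      apply List.filter_congr; intro z _; exact pvContains_perm hPperm z
    rw [this, pvFilter_len_perm _ hGperm]
  have hB1 : pvInterSize (SG.map (fun f => f + 1)) SP
      = ((G.filter (fun f => P.contains (f + 1))).length : Int) := by
    have hmsort : (SG.map (fun f => f + 1)).Pairwise (· < ·) := by
      refine List.pairwise_map.mpr (hGsort.imp ?_); intro a b h; omega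
    rw [pvInterSize_eq_filter _ SP hmsort hPsort]
    have : (SG.map (fun f => f + 1)).filter (fun x => SP.contains x)
        = (SG.filter (fun f => SP.contains (f + 1))).map (fun f => f + 1) := by
      rw [List.filter_map]; rfl
    rw [this]
    simp only [List.length_map]
    have : SG.filter (fun f => SP.contains (f + 1)) = SG.filter (fun f => P.contains (f + 1)) := by
      apply List.filter_congr; intro z _; exact pvContains_perm hPperm (z + 1)
    rw [this, pvFilter_len_perm _ hGperm]
  -- A side: unroll the two-offset loop
  simp only [List.foldl_cons, List.foldl_nil]
  have hsc : ∀ (s : List Int) z, PySem.Set.contains s z = s.contains z := fun _ _ => rfl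
  simp only [hsc]
  rw [pvFoldCount (fun f => P.contains (f + 0)) G (0 : Int),
      pvFoldCount (fun f => P.contains (f + 1)) G (0 : Int)]
  have h00 : (fun f => P.contains (f + 0)) = (fun f => P.contains f) := by
    funext f; rw [add_zero]
  rw [h00]
  set c0 : Int := ((G.filter (fun f => P.contains f)).length : Int) with hc0
  set c1 : Int := ((G.filter (fun f => P.contains (f + 1))).length : Int) with hc1
  have hnn : (0 : Int) ≤ c0 := by positivity
  rw [hB0, hB1]
  simp only [zero_add]
  rw [if_pos (by omega : c0 > (-1 : Int))]
  by_cases h : c1 > c0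
  · rw [if_pos h, if_pos h]
  · rw [if_neg h, if_neg h]
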